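-- pv_equiv track=rewrite | github.com/alexhagiopol/cracking-the-coding-interview | python_solutions/chapter_01_arrays_and_strings/problem_01_05_one_away.py | search_replacement
-- ===== SOURCE A (Python) =====
-- def search_replacement(s1, s2):
--     assert(len(s1) == len(s2))
--     i = 0
--     difference_found = False
--     while i < len(s1):
--         if s1[i] != s2[i]:
--             if difference_found:  # if a difference has already been found, return False
--                 return False
--             difference_found = True
--         i += 1
--     return True
-- ===== SOURCE B (Python) =====
-- def search_replacement(s1, s2):
--     assert(len(s1) == len(s2))
--     if s1 == s2:
--         return True
--     i = next(k for k in range(len(s1)) if s1[k] != s2[k])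
--     return s1[i + 1:] == s2[i + 1:]
-- ===== Notes on version B (the rewrite author's own statement) =====
-- stated objective: alternative
-- what changed: Instead of a single pass maintaining a mismatch flag (or count), B first tests whole-string equality, otherwise locates the first mismatching index and returns whether the suffixes after that index are equal -- a locate-then-compare-slices decomposition.
import Mathlib
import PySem

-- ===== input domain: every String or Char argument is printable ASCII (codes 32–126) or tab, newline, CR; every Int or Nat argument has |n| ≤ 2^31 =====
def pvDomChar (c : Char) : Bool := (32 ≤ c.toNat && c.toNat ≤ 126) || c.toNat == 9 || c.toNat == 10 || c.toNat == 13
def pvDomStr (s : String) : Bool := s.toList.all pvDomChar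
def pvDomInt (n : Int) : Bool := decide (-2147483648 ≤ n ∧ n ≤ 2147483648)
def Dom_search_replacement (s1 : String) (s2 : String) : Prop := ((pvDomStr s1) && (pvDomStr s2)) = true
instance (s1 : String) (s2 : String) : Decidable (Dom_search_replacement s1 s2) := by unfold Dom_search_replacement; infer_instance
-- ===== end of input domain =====

-- B replaces A's single-pass mismatch flag by whole-string equality, else locate the first
-- mismatching index and compare the suffixes after it (objective: alternative decomposition).

-- ===== PORT A =====
-- the while loop over i with the difference_found flag, walking both strings in step
def searchReplacementLoopA : List Char → List Char → Bool → Bool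
  | c1 :: t1, c2 :: t2, diff =>
      if c1 ≠ c2 then
        if diff then false
        else searchReplacementLoopA t1 t2 true
      else searchReplacementLoopA t1 t2 diff
  | _, _, _ => true

def search_replacement (s1 : String) (s2 : String) : Bool :=
  searchReplacementLoopA s1.toList s2.toList false

-- ===== PORT B =====
-- next(k for k in range(len(s1)) if s1[k] != s2[k]): index of the first mismatch
def firstMismatch : List Char → List Char → Option Nat
  | c1 :: t1, c2 :: t2 =>
      if c1 ≠ c2 then some 0
      else (firstMismatch t1 t2).map (· + 1)
  | _, _ => none

-- if s1 == s2: True; else i = first mismatch; return s1[i+1:] == s2[i+1:]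
def searchReplacementAltOn (l1 l2 : List Char) : Bool :=
  if l1 = l2 then true
  else
    match firstMismatch l1 l2 with
    | some i => decide (l1.drop (i + 1) = l2.drop (i + 1))
    | none => true   -- unreachable when l1 ≠ l2 and lengths are equal

def search_replacement_alt (s1 : String) (s2 : String) : Bool :=
  searchReplacementAltOn s1.toList s2.toList

-- ===== PRECONDITION & SPEC =====
-- Pre_ excludes unequal-length pairs, on which A's assert raises AssertionError.
def Pre_search_replacement (s1 : String) (s2 : String) : Prop :=
  s1.toList.length = s2.toList.length
instance (s1 : String) (s2 : String) : Decidable (Pre_search_replacement s1 s2) := by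
  unfold Pre_search_replacement; infer_instance
def pvWitness_search_replacement : String × String := ("pale", "bale")

def Spec_search_replacement (s1 : String) (s2 : String) (out : Bool) : Prop := out = search_replacement_alt s1 s2
instance (s1 : String) (s2 : String) (out : Bool) : Decidable (Spec_search_replacement s1 s2 out) := by unfold Spec_search_replacement; infer_instance

-- ===== CLAIM (what is proved, stated in full; the proofs are below) =====
def Claim_equal_search_replacement : Prop := ∀ (s1 : String) (s2 : String), Dom_search_replacement s1 s2 → Pre_search_replacement s1 s2 → Spec_search_replacement s1 s2 (search_replacement s1 s2)

-- ===== LEMMAS AND PROOFS =====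

-- A's loop with the flag already set accepts iff the remaining equal-length lists are equal
theorem searchReplacementLoopA_true (t1 t2 : List Char)
    (h : t1.length = t2.length) :
    searchReplacementLoopA t1 t2 true = decide (t1 = t2) := by
  induction t1 generalizing t2 with
  | nil => cases t2 with
    | nil => simp [searchReplacementLoopA]
    | cons _ _ => simp at h
  | cons c1 t1 ih =>
    cases t2 with
    | nil => simp at h
    | cons c2 t2 =>
      by_cases hc : c1 = c2
      · simp [searchReplacementLoopA, hc, ih _ (by simpa using h)]
      · simp [searchReplacementLoopA, hc]

theorem loopA_eq_altOn (l1 l2 : List Char) (h : l1.length = l2.length) :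
    searchReplacementLoopA l1 l2 false = searchReplacementAltOn l1 l2 := by
  induction l1 generalizing l2 with
  | nil => cases l2 with
    | nil => simp [searchReplacementLoopA, searchReplacementAltOn]
    | cons _ _ => simp at h
  | cons c1 t1 ih =>
    cases l2 with
    | nil => simp at h
    | cons c2 t2 =>
      have hlen : t1.length = t2.length := by simpa using h
      by_cases hc : c1 = c2
      · -- heads equal: both sides reduce to the tail problem
        subst hc
        rw [searchReplacementLoopA]
        rw [if_neg (by simp), ih _ hlen]
        unfold searchReplacementAltOn
        by_cases he : t1 = t2
        · simp [he]
        · rw [if_neg he, if_neg (by simp [he])]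
          rw [firstMismatch, if_neg (by simp)]
          cases hm : firstMismatch t1 t2 with
          | none => simp
          | some i => simp [List.drop]
      · -- first mismatch at index 0
        rw [searchReplacementLoopA]
        rw [if_pos hc, if_neg (by simp)]
        rw [searchReplacementLoopA_true _ _ hlen]
        unfold searchReplacementAltOn
        rw [if_neg (by simp [hc]), firstMismatch, if_pos hc]
        simp [List.drop]

-- ===== VERDICT (by name: the statement is the Claim_ definition above) =====
theorem search_replacement_spec : Claim_equal_search_replacement := by
  intro s1 s2 _ hpre
  unfold Spec_search_replacement search_replacement search_replacement_alt
  exact loopA_eq_altOn _ _ hpre
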